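-- pv_equiv track=rewrite | github.com/justduet/Portfolio | python_project/decode_message.py | pyramidify
-- ===== SOURCE A (Python) =====
-- def pyramidify(numbers):
--     # create a pyramid using incrementally longer lists
--     pyramid = []
--     step = 1
--     while len(numbers) != 0:
--         # add numbers to sublist up to the point of step
--         pyramid.append(numbers[:step])
--         # remove numbers in subset from numbers list
--         numbers = numbers[step:]
--         # every loop iteration add one more
--         step += 1
--     return pyramid
-- ===== SOURCE B (Python) =====
-- def pyramidify(numbers):
--     # single pass over the elements: grow a current row, flush it when it
--     # reaches the target length, keep any shorter trailing row at the end
--     pyramid = []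
--     current = []
--     step = 1
--     for x in numbers:
--         current.append(x)
--         if len(current) == step:
--             pyramid.append(current)
--             current = []
--             step += 1
--     if current:
--         pyramid.append(current)
--     return pyramid
-- ===== Notes on version B (the rewrite author's own statement) =====
-- stated objective: alternative
-- what changed: Replaces A's repeated list slicing (which rebuilds the remaining suffix of the list on every iteration) with a single pass over the elements that accumulates the current row and flushes it when it reaches the target length, appending the trailing partial row after the loop.
import Mathlib
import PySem

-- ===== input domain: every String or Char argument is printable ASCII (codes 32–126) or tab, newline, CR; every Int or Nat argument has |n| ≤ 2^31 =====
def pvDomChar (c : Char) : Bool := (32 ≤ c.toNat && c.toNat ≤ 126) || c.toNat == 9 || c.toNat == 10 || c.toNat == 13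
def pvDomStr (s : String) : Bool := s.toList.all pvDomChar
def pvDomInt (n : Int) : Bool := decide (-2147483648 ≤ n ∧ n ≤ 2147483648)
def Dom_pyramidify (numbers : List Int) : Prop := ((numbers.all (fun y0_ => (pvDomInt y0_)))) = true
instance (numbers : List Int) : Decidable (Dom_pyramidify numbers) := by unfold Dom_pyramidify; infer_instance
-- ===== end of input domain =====

-- B replaces A's repeated list slicing with a single pass that grows a current
-- row and flushes it at the target length (alternative decomposition, O(n) vs O(n^2)).

-- ===== PORT A =====
-- A's while loop; fuel only makes the recursion total (the loop shrinks numbers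
-- by step ≥ 1 each round, so fuel = length + 1 suffices).
def pyramidifyLoop : Nat → List Int → List (List Int) → Int → List (List Int)
  | 0, _, pyramid, _ => pyramid
  | fuel + 1, numbers, pyramid, step =>
      if numbers.length ≠ 0 then
        pyramidifyLoop fuel (PySem.List.slice numbers (some step) none)
          (pyramid ++ [PySem.List.slice numbers none (some step)]) (step + 1)
      else pyramid

def pyramidify (numbers : List Int) : List (List Int) :=
  pyramidifyLoop (numbers.length + 1) numbers [] 1

-- ===== PORT B =====
def pyramidifyStep (st : List (List Int) × List Int × Int) (x : Int) :
    List (List Int) × List Int × Int :=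
  let current := st.2.1 ++ [x]
  if (current.length : Int) = st.2.2 then (st.1 ++ [current], [], st.2.2 + 1)
  else (st.1, current, st.2.2)

def pyramidify_alt (numbers : List Int) : List (List Int) :=
  let st := numbers.foldl pyramidifyStep ([], [], 1)
  if st.2.1.length ≠ 0 then st.1 ++ [st.2.1] else st.1

-- ===== PRECONDITION & SPEC =====
def Spec_pyramidify (numbers : List Int) (out : List (List Int)) : Prop := out = pyramidify_alt numbers
instance (numbers : List Int) (out : List (List Int)) : Decidable (Spec_pyramidify numbers out) := by unfold Spec_pyramidify; infer_instance

-- ===== CLAIM (what is proved, stated in full; the proofs are below) =====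
def Claim_equal_pyramidify : Prop := ∀ (numbers : List Int), Dom_pyramidify numbers → Spec_pyramidify numbers (pyramidify numbers)

-- ===== LEMMAS AND PROOFS =====

-- one step below the target length just extends the current row
lemma step_lt (pyr : List (List Int)) (cur : List Int) (k x : Int)
    (h : ((cur.length + 1 : Nat) : Int) < k) :
    pyramidifyStep (pyr, cur, k) x = (pyr, cur ++ [x], k) := by
  simp only [pyramidifyStep]
  rw [if_neg (by simp only [List.length_append, List.length_cons, List.length_nil]; push_cast at h ⊢; omega)]

-- one step reaching the target length flushes the row
lemma step_eq (pyr : List (List Int)) (cur : List Int) (k x : Int)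
    (h : ((cur.length + 1 : Nat) : Int) = k) :
    pyramidifyStep (pyr, cur, k) x = (pyr ++ [cur ++ [x]], [], k + 1) := by
  simp only [pyramidifyStep]
  rw [if_pos (by simp only [List.length_append, List.length_cons, List.length_nil]; push_cast at h ⊢; omega)]

-- processing fewer elements than needed just extends the current row
lemma fold_partial (ys : List Int) : ∀ (cur : List Int) (pyr : List (List Int)) (k : Int),
    ((cur.length + ys.length : Nat) : Int) < k →
    List.foldl pyramidifyStep (pyr, cur, k) ys = (pyr, cur ++ ys, k) := by
  induction ys with
  | nil => intro cur pyr k _; simp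
  | cons y ys ih =>
      intro cur pyr k h
      simp only [List.length_cons] at h
      rw [List.foldl_cons, step_lt pyr cur k y (by push_cast at h ⊢; omega),
        ih (cur ++ [y]) pyr k
          (by simp only [List.length_append, List.length_cons, List.length_nil]; push_cast at h ⊢; omega)]
      simp

-- processing exactly the elements that complete the row flushes it
lemma fold_fill (ys : List Int) : ∀ (xs cur : List Int) (pyr : List (List Int)) (k : Int),
    ys ≠ [] → ((cur.length + ys.length : Nat) : Int) = k →
    List.foldl pyramidifyStep (pyr, cur, k) (ys ++ xs) =
      List.foldl pyramidifyStep (pyr ++ [cur ++ ys], [], k + 1) xs := by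
  induction ys with
  | nil => intro _ _ _ _ h _; exact absurd rfl h
  | cons y ys ih =>
      intro xs cur pyr k _ h
      simp only [List.length_cons] at h
      cases ys with
      | nil =>
          rw [List.cons_append, List.nil_append, List.foldl_cons,
            step_eq pyr cur k y (by simp only [List.length_nil] at h; push_cast at h ⊢; omega)]
      | cons z zs =>
          rw [List.cons_append, List.foldl_cons,
            step_lt pyr cur k y (by simp only [List.length_cons] at h; push_cast at h ⊢; omega)]
          have := ih xs (cur ++ [y]) pyr k (by simp)
            (by simp only [List.length_append, List.length_cons, List.length_nil] at h ⊢; push_cast at h ⊢; omega)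
          simpa using this

-- A's fueled loop computes B's fold-and-finalize
lemma loop_eq_fold (fuel : Nat) : ∀ (xs : List Int) (pyr : List (List Int)) (k : Int),
    xs.length ≤ fuel → 1 ≤ k →
    pyramidifyLoop fuel xs pyr k =
      (let st := List.foldl pyramidifyStep (pyr, [], k) xs
       if st.2.1.length ≠ 0 then st.1 ++ [st.2.1] else st.1) := by
  induction fuel with
  | zero =>
      intro xs pyr k hlen _
      have hxs : xs = [] := List.length_eq_zero_iff.mp (Nat.le_zero.mp hlen)
      subst hxs; simp [pyramidifyLoop]
  | succ f ih =>
      intro xs pyr k hlen hk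
      cases hxs : xs with
      | nil => simp [pyramidifyLoop]
      | cons a as =>
          subst hxs
          have hk0 : (0:Int) ≤ k := by omega
          simp only [pyramidifyLoop, List.length_cons, ne_eq, Nat.succ_ne_zero,
            not_false_eq_true, if_pos]
          rw [PySem.List.slice_from _ hk0, PySem.List.slice_to _ hk0]
          by_cases hle : (a :: as).length ≤ k.toNat
          · -- the whole list fits in this row
            have htake : (a :: as).take k.toNat = a :: as := List.take_of_length_le hle
            have hdrop : (a :: as).drop k.toNat = [] := List.drop_eq_nil_of_le hle
            rw [htake, hdrop]
            rw [ih [] (pyr ++ [a :: as]) (k + 1) (by simp) (by omega)]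
            simp only [List.foldl_nil]
            by_cases heq : (((a :: as).length : Nat) : Int) = k
            · -- exact fill: the fold flushes the row
              rw [show (a :: as : List Int) = (a :: as) ++ [] by simp,
                fold_fill (a :: as) [] [] pyr k (by simp) (by simpa using heq)]
              simp
            · -- strictly shorter: the fold keeps it as the trailing row
              have hlelt : ((a :: as).length : Int) < k := by
                have h1 : (((a :: as).length : Nat) : Int) ≤ ((k.toNat : Nat) : Int) := by
                  exact_mod_cast hle
                omega
              rw [fold_partial (a :: as) [] pyr k (by simpa using hlelt)]
              simp
          · -- the row is full and elements remain
            rw [not_le] at hle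
            have hklen : ((a :: as).take k.toNat).length = k.toNat :=
              List.length_take_of_le (Nat.le_of_lt hle)
            have hne : (a :: as).take k.toNat ≠ [] := by
              intro h; rw [h] at hklen; simp at hklen; omega
            have hdlen : ((a :: as).drop k.toNat).length ≤ f := by
              simp only [List.length_drop]
              simp only [List.length_cons] at hlen ⊢; omega
            rw [ih _ _ (k + 1) hdlen (by omega)]
            rw [show (a :: as : List Int) =
                  (a :: as).take k.toNat ++ (a :: as).drop k.toNat by simp,
              fold_fill _ _ [] pyr k hne
                (by rw [List.length_nil, Nat.zero_add, hklen]; omega)]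
            simp

-- ===== VERDICT (by name: the statement is the Claim_ definition above) =====
theorem pyramidify_spec : Claim_equal_pyramidify := by
  intro numbers _
  show pyramidify numbers = pyramidify_alt numbers
  unfold pyramidify pyramidify_alt
  exact loop_eq_fold (numbers.length + 1) numbers [] 1 (by omega) (by omega)
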